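-- pv_equiv track=rewrite | github.com/kaleidoscopica/adventofcode2023 | Day1/1-2.py | find_fives
-- ===== SOURCE A (Python) =====
-- def find_fives(s, digits_list):
--   for index, character in enumerate(s):
--     if character == "f" and (index+3) < len(s):
--       if s[index+1] == "i":
--         if s[index+2] == "v":
--           if s[index+3] == "e":
--             digits_list.append((index, "5"))
--   return digits_list
-- ===== SOURCE B (Python) =====
-- def find_fives(s, digits_list):
--   start = 0
--   while True:
--     pos = s.find("five", start)
--     if pos == -1:
--       break
--     digits_list.append((pos, "5"))
--     start = pos + 1
--   return digits_list
-- ===== Notes on version B (the rewrite author's own statement) =====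
-- stated objective: faster
-- what changed: A's per-character indexed scan with a bounds guard and three nested single-character comparisons is replaced by a loop over whole occurrences: repeatedly call s.find('five', start), record (pos, '5') and restart the search at pos+1 until find returns -1.
import Mathlib
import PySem

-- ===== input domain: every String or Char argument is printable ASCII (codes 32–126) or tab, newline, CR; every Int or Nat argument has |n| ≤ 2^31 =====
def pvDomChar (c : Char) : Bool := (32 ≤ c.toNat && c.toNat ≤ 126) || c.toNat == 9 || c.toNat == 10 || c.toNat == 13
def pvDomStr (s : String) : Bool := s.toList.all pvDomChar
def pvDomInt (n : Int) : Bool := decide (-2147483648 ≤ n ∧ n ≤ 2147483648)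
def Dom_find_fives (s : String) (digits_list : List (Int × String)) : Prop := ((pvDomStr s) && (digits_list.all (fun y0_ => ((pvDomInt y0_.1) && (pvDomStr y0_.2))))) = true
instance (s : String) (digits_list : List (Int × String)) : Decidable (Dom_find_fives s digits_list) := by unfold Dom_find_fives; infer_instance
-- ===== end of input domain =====

-- B replaces A's per-character scan (bounds guard + three nested lookups) by a loop over
-- whole occurrences via s.find("five", start), restarting at pos+1; objective: faster (constant factor).
-- A mutates digits_list in place (append); B does too; the equivalence proved is about the return value.

-- ===== PORT A =====
-- loop body of A: the nested ifs, indexing into the full string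
def pvStepA (full : List Char) (acc : List (Int × String)) (p : Int × Char) : List (Int × String) :=
  if p.2 = 'f' ∧ p.1 + 3 < (PySem.Chars.len full : Int) then
    if PySem.Chars.pyGet? full (p.1 + 1) = some 'i' then
      if PySem.Chars.pyGet? full (p.1 + 2) = some 'v' then
        if PySem.Chars.pyGet? full (p.1 + 3) = some 'e' then acc ++ [(p.1, "5")]
        else acc
      else acc
    else acc
  else acc

def find_fives (s : String) (digits_list : List (Int × String)) : List (Int × String) :=
  (PySem.List.enumerate s.toList 0).foldl (pvStepA s.toList) digits_list

-- ===== PORT B =====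
-- B's while loop: pos = s.find("five", start); stop at -1, else record (pos, "5"), start = pos+1.
-- start is kept as a Nat (it is 0 or pos+1 with pos ≥ 0); the dite guard only makes the
-- recursion total — it never fires on a real run (start ≤ len is an invariant).
def pvFindLoop (l : List Char) (acc : List (Int × String)) (start : Nat) : List (Int × String) :=
  if h : start ≤ l.length then
    let pos := PySem.Chars.findFrom l ['f', 'i', 'v', 'e'] (start : Int)
    if hp : pos = -1 then acc
    else pvFindLoop l (acc ++ [(pos, "5")]) (pos.toNat + 1)
  else acc
  termination_by l.length + 1 - start
  decreasing_by
    have hs := PySem.Chars.findFrom_natCast_spec l ['f', 'i', 'v', 'e'] start h hp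
    have _h1 : (start : Int) ≤ pos := hs.1
    have h4 : (['f', 'i', 'v', 'e'] : List Char).length ≤ (l.drop pos.toNat).length :=
      hs.2.1.length_le
    simp only [List.length_drop, List.length_cons, List.length_nil] at h4
    omega

def find_fives_alt (s : String) (digits_list : List (Int × String)) : List (Int × String) :=
  pvFindLoop s.toList digits_list 0

-- ===== PRECONDITION & SPEC =====
def Spec_find_fives (s : String) (digits_list : List (Int × String)) (out : List (Int × String)) : Prop := out = find_fives_alt s digits_list
instance (s : String) (digits_list : List (Int × String)) (out : List (Int × String)) : Decidable (Spec_find_fives s digits_list out) := by unfold Spec_find_fives; infer_instance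

-- ===== CLAIM (what is proved, stated in full; the proofs are below) =====
def Claim_equal_find_fives : Prop := ∀ (s : String) (digits_list : List (Int × String)), Dom_find_fives s digits_list → Spec_find_fives s digits_list (find_fives s digits_list)

-- ===== LEMMAS AND PROOFS =====

-- the indices of l at which "five" starts, in increasing order
def pvOcc (l : List Char) : List Nat :=
  (List.range l.length).filter (fun j => decide (['f', 'i', 'v', 'e'] <+: l.drop j))

-- specification list: the matches of "five" in l, indices offset by i
def pvMatches : List Char → Int → List (Int × String)
  | a :: b :: c :: d :: t, i =>
      (if a = 'f' ∧ b = 'i' ∧ c = 'v' ∧ d = 'e' then [(i, ("5" : String))] else [])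
        ++ pvMatches (b :: c :: d :: t) (i + 1)
  | _, _ => []
  termination_by l _ => l.length

lemma pvMatches_short (l : List Char) (i : Int) (h : l.length < 4) : pvMatches l i = [] := by
  rcases l with _ | ⟨a, _ | ⟨b, _ | ⟨c, _ | ⟨d, t⟩⟩⟩⟩
  · simp [pvMatches]
  · simp [pvMatches]
  · simp [pvMatches]
  · simp [pvMatches]
  · simp at h; omega

lemma pvLoopA (l pre : List Char) (acc : List (Int × String)) :
    (PySem.List.enumerate l (pre.length : Int)).foldl (pvStepA (pre ++ l)) acc
      = acc ++ pvMatches l (pre.length : Int) := by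
  induction l generalizing pre acc with
  | nil => simp [PySem.List.enumerate_nil, pvMatches]
  | cons a rest ih =>
    rw [PySem.List.enumerate_cons]
    simp only [List.foldl_cons]
    have hpre : ((pre ++ [a]).length : Int) = (pre.length : Int) + 1 := by simp
    have hfull : pre ++ a :: rest = (pre ++ [a]) ++ rest := by simp
    have := ih (pre ++ [a]) (pvStepA (pre ++ a :: rest) acc ((pre.length : Int), a))
    rw [hpre, ← hfull] at this
    rw [this]
    match rest with
    | b :: c :: d :: t =>
      have h1 : PySem.Chars.pyGet? (pre ++ a :: b :: c :: d :: t) ((pre.length : Int) + 1)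
          = some b := by
        have := PySem.List.pyGet?_append_right (pre := pre) (ys := a :: b :: c :: d :: t) (k := 1)
        simpa using this
      have h2 : PySem.Chars.pyGet? (pre ++ a :: b :: c :: d :: t) ((pre.length : Int) + 2)
          = some c := by
        have := PySem.List.pyGet?_append_right (pre := pre) (ys := a :: b :: c :: d :: t) (k := 2)
        simpa using this
      have h3 : PySem.Chars.pyGet? (pre ++ a :: b :: c :: d :: t) ((pre.length : Int) + 3)
          = some d := by
        have := PySem.List.pyGet?_append_right (pre := pre) (ys := a :: b :: c :: d :: t) (k := 3)
        simpa using this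
      have hlen : ((pre.length : Int) + 3 < (PySem.Chars.len (pre ++ a :: b :: c :: d :: t) : Int)) := by
        simp [PySem.Chars.len_eq]; omega
      rw [pvMatches]
      simp only [pvStepA, h1, h2, h3, hlen, and_true]
      by_cases hA : a = 'f' <;> by_cases hB : b = 'i' <;> by_cases hC : c = 'v' <;>
        by_cases hD : d = 'e' <;> simp [hA, hB, hC, hD]
    | [] =>
      simp [pvStepA, PySem.Chars.len_eq, pvMatches_short [] _ (by simp),
        pvMatches_short [a] _ (by simp)]
    | [b] =>
      simp [pvStepA, PySem.Chars.len_eq, pvMatches_short [b] _ (by simp),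
        pvMatches_short [a, b] _ (by simp)]
    | [b, c] =>
      simp [pvStepA, PySem.Chars.len_eq, pvMatches_short [b, c] _ (by simp),
        pvMatches_short [a, b, c] _ (by simp)]

-- pvMatches is the occurrence list, mapped to (index, "5")
lemma pvOcc_cons (a : Char) (rest : List Char) :
    pvOcc (a :: rest)
      = (if ['f', 'i', 'v', 'e'] <+: a :: rest then [0] else [])
        ++ (pvOcc rest).map (· + 1) := by
  unfold pvOcc
  rw [List.length_cons, List.range_succ_eq_map, List.filter_cons, List.filter_map]
  by_cases h : (['f', 'i', 'v', 'e'] : List Char) <+: a :: rest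
  · rw [if_pos h, if_pos (by simpa using h)]
    rfl
  · rw [if_neg h, if_neg (by simpa using h)]
    rfl

lemma pvMatches_eq_occ (l : List Char) (i : Int) :
    pvMatches l i = (pvOcc l).map (fun (j : Nat) => (i + (j : Int), ("5" : String))) := by
  induction l generalizing i with
  | nil => simp [pvMatches, pvOcc]
  | cons a rest ih =>
    rw [pvOcc_cons]
    rcases rest with _ | ⟨b, _ | ⟨c, _ | ⟨d, t⟩⟩⟩
    · have : ¬ (['f', 'i', 'v', 'e'] : List Char) <+: [a] := by
        intro h; have := h.length_le; simp at this
      simp [pvMatches_short, this, pvOcc]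
    · have : ¬ (['f', 'i', 'v', 'e'] : List Char) <+: [a, b] := by
        intro h; have := h.length_le; simp at this
      have h2 : pvOcc [b] = [] := by
        unfold pvOcc
        refine List.filter_eq_nil_iff.mpr ?_
        intro j hj
        simp only [decide_eq_true_eq]
        intro hp
        have := hp.length_le
        simp at hj this
        omega
      simp [pvMatches_short, this, h2]
    · have : ¬ (['f', 'i', 'v', 'e'] : List Char) <+: [a, b, c] := by
        intro h; have := h.length_le; simp at this
      have h2 : pvOcc [b, c] = [] := by
        unfold pvOcc
        refine List.filter_eq_nil_iff.mpr ?_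
        intro j hj
        simp only [decide_eq_true_eq]
        intro hp
        have := hp.length_le
        simp at hj this
        omega
      simp [pvMatches_short, this, h2]
    · rw [pvMatches, ih]
      have hpref : ((['f', 'i', 'v', 'e'] : List Char) <+: a :: b :: c :: d :: t)
          ↔ (a = 'f' ∧ b = 'i' ∧ c = 'v' ∧ d = 'e') := by
        constructor
        · intro h
          rcases h with ⟨u, hu⟩
          injection hu with h1 hu; injection hu with h2 hu
          injection hu with h3 hu; injection hu with h4 _
          exact ⟨h1.symm, h2.symm, h3.symm, h4.symm⟩
        · rintro ⟨rfl, rfl, rfl, rfl⟩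
          exact ⟨t, rfl⟩
      have hshift : ∀ xs : List Nat,
          (xs.map (· + 1)).map (fun (j : Nat) => (i + (j : Int), ("5" : String)))
            = xs.map (fun (j : Nat) => (i + 1 + (j : Int), ("5" : String))) := by
        intro xs
        rw [List.map_map]
        refine List.map_congr_left ?_
        intro j _
        simp only [Function.comp]
        exact Prod.ext (by push_cast; ring) rfl
      rw [List.map_append, hshift]
      by_cases h : a = 'f' ∧ b = 'i' ∧ c = 'v' ∧ d = 'e'
      · rw [if_pos h, if_pos (hpref.mpr h)]
        simp
      · rw [if_neg h, if_neg (fun hh => h (hpref.mp hh))]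
        simp

-- sorted-filter step: peeling the first element ≥ start off pvOcc
lemma pvOcc_sorted (l : List Char) : (pvOcc l).Pairwise (· < ·) :=
  (List.pairwise_lt_range).filter _

lemma pvFilter_peel (xs : List Nat) (hs : xs.Pairwise (· < ·)) (m start : Nat)
    (hm : m ∈ xs) (hstart : start ≤ m)
    (hmin : ∀ j ∈ xs, start ≤ j → m ≤ j) :
    xs.filter (fun j => start ≤ j) = m :: xs.filter (fun j => m + 1 ≤ j) := by
  induction xs with
  | nil => simp at hm
  | cons x t ih =>
    rcases List.mem_cons.mp hm with rfl | hmt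
    · rw [List.filter_cons, List.filter_cons]
      simp only [hstart, decide_true, if_pos, show ¬ (m + 1 ≤ m) by omega, decide_false]
      simp only [Bool.false_eq_true, if_false]
      congr 1
      refine List.filter_congr ?_
      intro j hj
      have hlt : m < j := (List.pairwise_cons.mp hs).1 j hj
      simp only [decide_eq_decide]
      omega
    · have hxm : x < m := by
        rcases List.pairwise_cons.mp hs with ⟨hfst, _⟩
        exact hfst m hmt
      have hxs : ¬ start ≤ x := by
        intro hsx
        have := hmin x (List.mem_cons_self ..) hsx
        omega
      rw [List.filter_cons, List.filter_cons]
      simp only [hxs, decide_false, Bool.false_eq_true, if_false,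
        show ¬ (m + 1 ≤ x) by omega]
      exact ih ((List.pairwise_cons.mp hs).2) hmt
        (fun j hj hsj => hmin j (List.mem_cons_of_mem _ hj) hsj)

-- occurrences ≥ start are exactly infix occurrences in the dropped suffix
lemma pvOcc_from_empty (l : List Char) (start : Nat) (_hstart : start ≤ l.length)
    (hno : ¬ (['f', 'i', 'v', 'e'] : List Char) <:+: l.drop start) :
    (pvOcc l).filter (fun j => start ≤ j) = [] := by
  refine List.filter_eq_nil_iff.mpr ?_
  intro j hj hsj
  simp only [decide_eq_true_eq] at hsj
  have hpref : (['f', 'i', 'v', 'e'] : List Char) <+: l.drop j := by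
    have := List.mem_filter.mp hj
    simpa using this.2
  apply hno
  have : l.drop j = (l.drop start).drop (j - start) := by
    rw [List.drop_drop]; congr 1; omega
  rw [this] at hpref
  exact hpref.isInfix.trans (List.drop_suffix _ _).isInfix

-- B's loop computes acc ++ the ≥ start occurrences
lemma pvLoopB (l : List Char) (acc : List (Int × String)) (start : Nat) :
    start ≤ l.length →
    pvFindLoop l acc start
      = acc ++ ((pvOcc l).filter (fun j => start ≤ j)).map
          (fun (j : Nat) => ((j : Int), ("5" : String))) := by
  induction acc, start using pvFindLoop.induct (l := l) with
  | case1 acc start h pos hp =>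
    rw [pvFindLoop]
    intro _
    rw [dif_pos h, dif_pos hp]
    rw [pvOcc_from_empty l start h
      ((PySem.Chars.findFrom_natCast_eq_neg_one_iff l _ start h).mp hp)]
    simp
  | case2 acc start h pos hp ih =>
    intro _
    rw [pvFindLoop, dif_pos h]
    rw [dif_neg hp]
    have hs := PySem.Chars.findFrom_natCast_spec l ['f', 'i', 'v', 'e'] start h hp
    set pos := PySem.Chars.findFrom l ['f', 'i', 'v', 'e'] (start : Int) with hposdef
    have h1 : (start : Int) ≤ pos := hs.1
    have h4 : (4 : Nat) ≤ (l.drop pos.toNat).length := by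
      have := hs.2.1.length_le; simpa using this
    have hlt : pos.toNat + 1 ≤ l.length := by
      simp only [List.length_drop] at h4; omega
    rw [ih hlt]
    have hmem : pos.toNat ∈ pvOcc l := by
      unfold pvOcc
      refine List.mem_filter.mpr ⟨List.mem_range.mpr ?_, by simpa using hs.2.1⟩
      simp only [List.length_drop] at h4; omega
    have hpeel := pvFilter_peel (pvOcc l) (pvOcc_sorted l) pos.toNat start hmem
      (by omega)
      (by
        intro j hj hsj
        by_contra hcon
        rw [not_le] at hcon
        exact hs.2.2 j hsj hcon (by
          have := List.mem_filter.mp hj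
          simpa using this.2))
    rw [hpeel]
    have hposnn : (0 : Int) ≤ pos := le_trans (by positivity) h1
    simp [Int.toNat_of_nonneg hposnn]
    exact ⟨rfl, rfl⟩
  | case3 acc start h =>
    intro hc
    omega

-- ===== VERDICT (by name: the statement is the Claim_ definition above) =====
theorem find_fives_spec : Claim_equal_find_fives := by
  intro s digits_list _
  unfold Spec_find_fives find_fives find_fives_alt
  have hA := pvLoopA s.toList [] digits_list
  simp only [List.nil_append, List.length_nil, Nat.cast_zero] at hA
  rw [hA, pvLoopB s.toList digits_list 0 (Nat.zero_le _)]
  rw [pvMatches_eq_occ]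
  simp
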